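-- pv_equiv track=rewrite | github.com/mariomarino/cec-fstpso2 | code/plots_remedy.py | basins_to_count_cum
-- ===== SOURCE A (Python) =====
-- def basins_to_count_cum(basins):
--     n_iters = len(basins)
--     flat_list = set([])
--     count_basins = []
--     for iteration in range(n_iters):
--         flat_list = flat_list.union(basins[iteration])
--         count_basins.append(len(flat_list))
--     return count_basins
-- ===== SOURCE B (Python) =====
-- def basins_to_count_cum(basins):
--     # Phase 1: map each distinct element to the index of the earliest iteration containing it.
--     first_seen = {}
--     for i, iteration in enumerate(basins):
--         for x in iteration:
--             if x not in first_seen: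
--                 first_seen[x] = i
--     # Phase 2+3: the cumulative distinct count at iteration i is the number of
--     # first-occurrence indices <= i; accumulate it as a running total.
--     order = list(first_seen.values())
--     out = []
--     total = 0
--     for i in range(len(basins)):
--         total += order.count(i)
--         out.append(total)
--     return out
-- ===== Notes on version B (the rewrite author's own statement) =====
-- stated objective: alternative
-- what changed: Replaces the running set-union loop by a two-phase scheme: a first pass builds a first-seen dict mapping every distinct element to its earliest iteration index, then a prefix-sum pass counts first-occurrence indices <= i to produce each cumulative distinct count.
import Mathlib
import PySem

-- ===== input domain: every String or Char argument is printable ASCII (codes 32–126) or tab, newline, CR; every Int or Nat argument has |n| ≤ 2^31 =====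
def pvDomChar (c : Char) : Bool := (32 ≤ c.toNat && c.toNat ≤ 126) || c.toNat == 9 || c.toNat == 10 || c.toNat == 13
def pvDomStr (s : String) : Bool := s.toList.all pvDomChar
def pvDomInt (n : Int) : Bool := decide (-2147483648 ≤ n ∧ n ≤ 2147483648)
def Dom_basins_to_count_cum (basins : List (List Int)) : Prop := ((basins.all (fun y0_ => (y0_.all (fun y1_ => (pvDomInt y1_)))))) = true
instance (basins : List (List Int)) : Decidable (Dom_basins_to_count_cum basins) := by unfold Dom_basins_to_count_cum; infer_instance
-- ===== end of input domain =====

-- B replaces A's running set-union loop by a two-phase scheme (first-seen index dict, then a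
-- prefix-sum over per-iteration counts of first occurrences); equal output, similar cost.


-- ===== PORT A =====
def basins_to_count_cum (basins : List (List Int)) : List Int :=
  let n_iters := PySem.List.len basins
  ((PySem.List.pyRange 0 n_iters).foldl
    (fun (st : PySem.Set Int × List Int) iteration =>
      let flat_list := st.1.union (PySem.List.pyGetD basins iteration [])
      (flat_list, st.2 ++ [PySem.List.len flat_list]))
    (PySem.Set.ofList [], [])).2

-- ===== PORT B =====
def basins_to_count_cum_alt (basins : List (List Int)) : List Int :=
  let first_seen : PySem.Dict Int Int :=
    (PySem.List.enumerate basins).foldl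
      (fun d p => p.2.foldl (fun d x => if d.contains x then d else d.insert x p.1) d)
      PySem.Dict.empty
  let order := first_seen.values
  ((PySem.List.pyRange 0 (PySem.List.len basins)).foldl
    (fun (st : Int × List Int) i =>
      let total := st.1 + (order.count i : Int)
      (total, st.2 ++ [total]))
    (0, [])).2

-- ===== PRECONDITION & SPEC =====
def Spec_basins_to_count_cum (basins : List (List Int)) (out : List Int) : Prop := out = basins_to_count_cum_alt basins
instance (basins : List (List Int)) (out : List Int) : Decidable (Spec_basins_to_count_cum basins out) := by unfold Spec_basins_to_count_cum; infer_instance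

-- ===== CLAIM (what is proved, stated in full; the proofs are below) =====
def Claim_equal_basins_to_count_cum : Prop := ∀ (basins : List (List Int)), Dom_basins_to_count_cum basins → Spec_basins_to_count_cum basins (basins_to_count_cum basins)

-- ===== LEMMAS AND PROOFS =====

-- B's inner loop over one iteration's elements (proof-side name for the port's loop body).
def pvStep (d : PySem.Dict Int Int) (i : Int) (b : List Int) : PySem.Dict Int Int :=
  b.foldl (fun d x => if d.contains x then d else d.insert x i) d

-- B's outer loop, recursively over the iterations with their indices.
def pvFS (d : PySem.Dict Int Int) (i : Int) : List (List Int) → PySem.Dict Int Int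
  | [] => d
  | b :: bs => pvFS (pvStep d i b) (i + 1) bs

lemma pvEnum (bs : List (List Int)) : ∀ (i : Int) (d : PySem.Dict Int Int),
    (PySem.List.enumerate bs i).foldl
      (fun d (p : Int × List Int) => p.2.foldl (fun d x => if d.contains x then d else d.insert x p.1) d) d
    = pvFS d i bs := by
  induction bs with
  | nil => intro i d; simp [PySem.List.enumerate, pvFS]
  | cons b bs ih => intro i d; simp [PySem.List.enumerate, pvFS, pvStep, ih]

lemma pvLenAdd (S : PySem.Set Int) (x : Int) : S.length ≤ (PySem.Set.add S x).length := by
  simp only [PySem.Set.add]; split <;> simp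

lemma pvLenUpdate (xs : List Int) : ∀ S : PySem.Set Int, S.length ≤ (PySem.Set.update S xs).length := by
  induction xs with
  | nil => intro S; simp [PySem.Set.update]
  | cons x xs ih =>
      intro S
      have h1 := pvLenAdd S x
      have h2 := ih (PySem.Set.add S x)
      simp only [PySem.Set.update, List.foldl_cons] at h2 ⊢
      omega

lemma pvAdd_of_mem {S : PySem.Set Int} {x : Int} (h : x ∈ S) : PySem.Set.add S x = S := by
  simp [PySem.Set.add, h]

lemma pvAdd_of_not_mem {S : PySem.Set Int} {x : Int} (h : x ∉ S) : PySem.Set.add S x = S ++ [x] := by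
  simp [PySem.Set.add, h]

lemma pvStep_keys (b : List Int) : ∀ (d : PySem.Dict Int Int) (i : Int),
    (pvStep d i b).keys = PySem.Set.update d.keys b := by
  induction b with
  | nil => intro d i; simp [pvStep, PySem.Set.update]
  | cons x b ih =>
      intro d i
      simp only [pvStep, List.foldl_cons, PySem.Set.update, List.foldl_cons] at *
      by_cases hc : d.contains x = true
      · have hm : x ∈ d.keys := (PySem.Dict.contains_iff_mem_keys d x).mp hc
        rw [hc]; simp only [if_true]
        rw [ih d i, pvAdd_of_mem hm]
      · have hm : x ∉ d.keys := fun h => hc ((PySem.Dict.contains_iff_mem_keys d x).mpr h)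
        have hc' : d.contains x = false := by simpa using hc
        rw [hc']; simp only [Bool.false_eq_true, if_false]
        rw [ih (d.insert x i) i, PySem.Dict.keys_insert_of_not_contains d i hc', pvAdd_of_not_mem hm]

lemma pvStep_nodup (b : List Int) (d : PySem.Dict Int Int) (i : Int) (h : d.keys.Nodup) :
    (pvStep d i b).keys.Nodup := by
  rw [pvStep_keys]; exact PySem.Set.nodup_update d.keys b h

lemma pvValues_insert (d : PySem.Dict Int Int) {x : Int} (i : Int) (hc : d.contains x = false) :
    (d.insert x i).values = d.values ++ [i] := by
  simp [PySem.Dict.values, PySem.Dict.items_insert_of_not_contains d i hc]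

lemma pvStep_values (b : List Int) : ∀ (d : PySem.Dict Int Int) (i : Int), d.keys.Nodup →
    (pvStep d i b).values
      = d.values ++ List.replicate ((PySem.Set.update d.keys b).length - d.keys.length) i := by
  induction b with
  | nil => intro d i _; simp [pvStep, PySem.Set.update]
  | cons x b ih =>
      intro d i hnd
      by_cases hc : d.contains x = true
      · have hm : x ∈ d.keys := (PySem.Dict.contains_iff_mem_keys d x).mp hc
        simp only [pvStep, List.foldl_cons, hc, if_true]
        have := ih d i hnd
        simp only [pvStep] at this
        rw [this]
        simp only [PySem.Set.update, List.foldl_cons]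
        rw [pvAdd_of_mem hm]
      · have hm : x ∉ d.keys := fun h => hc ((PySem.Dict.contains_iff_mem_keys d x).mpr h)
        have hc' : d.contains x = false := by simpa using hc
        simp only [pvStep, List.foldl_cons, hc', Bool.false_eq_true, if_false]
        have hnd' : (d.insert x i).keys.Nodup := by
          rw [PySem.Dict.keys_insert_of_not_contains d i hc']
          simpa [List.nodup_append] using ⟨hnd, fun a ha h => hm (h ▸ ha)⟩
        have := ih (d.insert x i) i hnd'
        simp only [pvStep] at this
        rw [this, pvValues_insert d i hc']
        rw [PySem.Dict.keys_insert_of_not_contains d i hc']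
        simp only [PySem.Set.update, List.foldl_cons]
        rw [pvAdd_of_not_mem hm]
        have hmono := pvLenUpdate b (d.keys ++ [x])
        simp only [PySem.Set.update] at hmono
        have hlen : (d.keys ++ [x]).length = d.keys.length + 1 := by simp
        rw [List.append_assoc]
        congr 1
        have : (List.foldl PySem.Set.add (d.keys ++ [x]) b).length - d.keys.length
            = ((List.foldl PySem.Set.add (d.keys ++ [x]) b).length - (d.keys ++ [x]).length) + 1 := by
          omega
        rw [this, List.replicate_succ]
        rfl

lemma pvCountReplicate (m : Nat) (k i : Int) :
    (List.replicate m k).countP (fun v => decide (v ≤ i)) = if k ≤ i then m else 0 := by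
  induction m with
  | zero => simp
  | succ m ih =>
      rw [List.replicate_succ, List.countP_cons, ih]
      by_cases h : k ≤ i
      · simp [h]
      · simp [h]

lemma pvCNT (bs : List (List Int)) : ∀ (d : PySem.Dict Int Int) (k : Int), d.keys.Nodup → ∀ (i : Int),
    ((pvFS d k bs).values.countP (fun v => decide (v ≤ i)))
      = d.values.countP (fun v => decide (v ≤ i)) +
        (if i < k then 0
         else (PySem.Set.update d.keys ((bs.take (i - k + 1).toNat).flatten)).length - d.keys.length) := by
  induction bs with
  | nil =>
      intro d k _ i
      simp only [pvFS, List.take_nil, List.flatten_nil]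
      split_ifs <;> simp [PySem.Set.update]
  | cons b bs ih =>
      intro d k hnd i
      simp only [pvFS]
      rw [ih (pvStep d k b) (k + 1) (pvStep_nodup b d k hnd) i]
      rw [pvStep_values b d k hnd, List.countP_append, pvCountReplicate]
      rw [pvStep_keys]
      have hm1 := pvLenUpdate b d.keys
      by_cases h1 : i < k
      · have h2 : i < k + 1 := by omega
        have h3 : ¬ k ≤ i := by omega
        simp [h1, h2, h3]
      · by_cases h2 : i < k + 1
        · -- i = k
          have hik : i = k := by omega
          have h3 : k ≤ i := by omega
          have ht : (i - k + 1).toNat = 1 := by omega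
          simp only [h1, if_false, h2, if_true, h3, ht]
          simp [List.take_succ_cons]
        · have h3 : k ≤ i := by omega
          have ht : (i - k + 1).toNat = (i - (k + 1) + 1).toNat + 1 := by omega
          simp only [h1, if_false, h2, if_false, h3, if_true, ht]
          rw [List.take_succ_cons, List.flatten_cons, PySem.Set.update_append]
          have hm2 := pvLenUpdate ((bs.take (i - (k+1) + 1).toNat).flatten) (PySem.Set.update d.keys b)
          omega

lemma pvVNN (bs : List (List Int)) : ∀ (d : PySem.Dict Int Int) (k : Int), d.keys.Nodup →
    (∀ v ∈ d.values, 0 ≤ v) → 0 ≤ k → ∀ v ∈ (pvFS d k bs).values, 0 ≤ v := by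
  induction bs with
  | nil => intro d k _ hv _ v hm; exact hv v hm
  | cons b bs ih =>
      intro d k hnd hv hk v hm
      refine ih (pvStep d k b) (k + 1) (pvStep_nodup b d k hnd) ?_ (by omega) v hm
      intro w hw
      rw [pvStep_values b d k hnd] at hw
      rcases List.mem_append.mp hw with h | h
      · exact hv w h
      · have := List.eq_of_mem_replicate h; omega

lemma pvCSplit (q : List Int) (n : Int) :
    q.countP (fun v => decide (v < n + 1)) = q.countP (fun v => decide (v < n)) + q.count n := by
  induction q with
  | nil => simp
  | cons v q ih =>
      simp only [List.countP_cons, List.count_cons, ih]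
      by_cases h1 : v < n
      · have h2 : v < n + 1 := by omega
        have h3 : ¬ v = n := by omega
        simp [h1, h2, h3]
        try omega
      · by_cases h2 : v = n
        · subst h2
          simp [show v < v + 1 by omega]
          try omega
        · have h3 : ¬ v < n + 1 := by omega
          simp [h1, h2, h3]
          try omega

lemma pvBF (q : List Int) (hq : ∀ v ∈ q, 0 ≤ v) : ∀ (n : Nat),
    (List.range n).foldl
      (fun (st : Int × List Int) (j : Nat) =>
        (st.1 + (q.count ((j : Int)) : Int), st.2 ++ [st.1 + (q.count ((j : Int)) : Int)]))
      (0, [])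
    = ((q.countP (fun v => decide (v < (n : Int))) : Int),
       (List.range n).map (fun (j : Nat) => ((q.countP (fun v => decide (v < (j : Int) + 1)) : Int)))) := by
  intro n
  induction n with
  | zero =>
      simp only [List.range_zero, List.foldl_nil, List.map_nil]
      have : q.countP (fun v => decide (v < (0 : Int))) = 0 :=
        List.countP_eq_zero.mpr (fun v hv => by simpa using not_lt.mpr (hq v hv))
      simp [this]
  | succ n ih =>
      rw [List.range_succ, List.foldl_append, ih, List.map_append]
      simp only [List.foldl_cons, List.foldl_nil, List.map_cons, List.map_nil, Prod.mk.injEq,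
        Nat.cast_add, Nat.cast_one]
      have h1 : (↑(q.countP (fun v => decide (v < (n : Int)))) : Int) + ↑(q.count ((n : Int)))
          = ↑(q.countP (fun v => decide (v < (n : Int) + 1))) := by
        exact_mod_cast (pvCSplit q (n : Int)).symm
      exact ⟨h1, by rw [h1]⟩

lemma pvA (bs : List (List Int)) : ∀ (S : PySem.Set Int) (out : List Int),
    (bs.foldl
      (fun (st : PySem.Set Int × List Int) b =>
        (st.1.union b, st.2 ++ [PySem.List.len (st.1.union b)]))
      (S, out)).2
    = out ++ (List.range bs.length).map
        (fun j => (((PySem.Set.update S ((bs.take (j + 1)).flatten)).length : Int))) := by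
  induction bs with
  | nil => intro S out; simp
  | cons b bs ih =>
      intro S out
      rw [List.foldl_cons, ih, List.length_cons, List.range_succ_eq_map]
      have hnil : ∀ s : PySem.Set Int, s.update ([] : List Int) = s := fun s => rfl
      simp only [List.map_cons, List.map_map, Function.comp_def, Nat.succ_eq_add_one,
        List.take_succ_cons, List.flatten_cons, PySem.Set.update_append, List.take_zero,
        List.flatten_nil, hnil, PySem.Set.union, PySem.List.len, List.append_assoc,
        List.singleton_append]

-- A's port, reduced to a closed description of its output.
lemma pvA_top (basins : List (List Int)) :
    basins_to_count_cum basins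
      = (List.range basins.length).map
          (fun j => (((PySem.Set.update [] ((basins.take (j + 1)).flatten)).length : Int))) := by
  show ((PySem.List.pyRange 0 (PySem.List.len basins)).foldl
      (fun (st : PySem.Set Int × List Int) iteration =>
        ((st.1.union (PySem.List.pyGetD basins iteration [])),
         st.2 ++ [PySem.List.len (st.1.union (PySem.List.pyGetD basins iteration []))]))
      (PySem.Set.ofList [], [])).2 = _
  rw [PySem.List.foldl_pyRange_pyGetD basins []
    (fun (st : PySem.Set Int × List Int) b => (st.1.union b, st.2 ++ [PySem.List.len (st.1.union b)]))
    ((PySem.Set.ofList [], [])) (le_refl 0)]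
  simpa using pvA basins (PySem.Set.ofList []) []

-- B's port, reduced to the same closed description.
lemma pvB_top (basins : List (List Int)) :
    basins_to_count_cum_alt basins
      = (List.range basins.length).map
          (fun j => (((PySem.Set.update [] ((basins.take (j + 1)).flatten)).length : Int))) := by
  show ((PySem.List.pyRange 0 (PySem.List.len basins)).foldl
      (fun (st : Int × List Int) i =>
        (st.1 + ((((PySem.List.enumerate basins).foldl
            (fun d (p : Int × List Int) =>
              p.2.foldl (fun d x => if d.contains x then d else d.insert x p.1) d)
            PySem.Dict.empty).values).count i : Int),
         st.2 ++ [st.1 + ((((PySem.List.enumerate basins).foldl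
            (fun d (p : Int × List Int) =>
              p.2.foldl (fun d x => if d.contains x then d else d.insert x p.1) d)
            PySem.Dict.empty).values).count i : Int)]))
      (0, [])).2 = _
  rw [pvEnum basins 0 PySem.Dict.empty]
  have hq : ∀ v ∈ (pvFS PySem.Dict.empty 0 basins).values, 0 ≤ v := by
    refine pvVNN basins PySem.Dict.empty 0 PySem.Dict.nodup_keys_empty ?_ (le_refl 0)
    intro v hv; simp [PySem.Dict.values, PySem.Dict.empty] at hv
  rw [show PySem.List.len basins = ((basins.length : Nat) : Int) from rfl,
    PySem.List.pyRange_zero_natCast, List.foldl_map, pvBF _ hq basins.length]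
  refine List.map_congr_left ?_
  intro j _
  have hcnt := pvCNT basins PySem.Dict.empty 0 PySem.Dict.nodup_keys_empty (j : Int)
  have hpred : (fun v => decide (v < (j : Int) + 1)) = (fun v => decide (v ≤ (j : Int))) := by
    funext v
    by_cases h : v ≤ (j : Int)
    · simp [h, show v < (j : Int) + 1 by omega]
    · simp [h, show ¬ v < (j : Int) + 1 by omega]
  have htn : ((j : Int) - 0 + 1).toNat = j + 1 := by omega
  have hnotlt : ¬ ((j : Int) < 0) := by omega
  have hvals : (PySem.Dict.empty : PySem.Dict Int Int).values = [] := rfl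
  have hkeys : (PySem.Dict.empty : PySem.Dict Int Int).keys = [] := rfl
  rw [hpred]
  rw [hvals, hkeys, htn] at hcnt
  simp only [List.countP_nil, hnotlt, if_false, List.length_nil, Nat.sub_zero, Nat.zero_add] at hcnt
  rw [hcnt]

-- ===== VERDICT (by name: the statement is the Claim_ definition above) =====
theorem basins_to_count_cum_spec : Claim_equal_basins_to_count_cum := by
  intro basins _
  unfold Spec_basins_to_count_cum
  rw [pvA_top, pvB_top]
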